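-- pv_equiv track=rewrite | github.com/devpatel0716/Poker-Game-Final | main.py | has_pair
-- ===== SOURCE A (Python) =====
-- def has_pair(cards):
--     card_counts = {}
--     for card in cards:
--         value = card.split(" of ")[0]
--         if value in card_counts:
--             card_counts[value] += 1
--         else:
--             card_counts[value] = 1
--     for card in card_counts:
--         if card_counts[card] == 2:
--             return True
--     return False
-- ===== SOURCE B (Python) =====
-- def has_pair(cards):
--     values = sorted(card.split(" of ")[0] for card in cards)
--     if not values:
--         return False
--     cur = values[0]
--     run = 1
--     for v in values[1:]:
--         if v == cur:
--             run += 1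
--         else:
--             if run == 2:
--                 return True
--             cur = v
--             run = 1
--     return run == 2
-- ===== Notes on version B (the rewrite author's own statement) =====
-- stated objective: alternative
-- what changed: B replaces A's hash-counting with a sort-then-scan: it sorts the extracted values and walks the sorted list tracking run lengths, returning True when a run of exactly 2 ends.
import Mathlib
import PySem

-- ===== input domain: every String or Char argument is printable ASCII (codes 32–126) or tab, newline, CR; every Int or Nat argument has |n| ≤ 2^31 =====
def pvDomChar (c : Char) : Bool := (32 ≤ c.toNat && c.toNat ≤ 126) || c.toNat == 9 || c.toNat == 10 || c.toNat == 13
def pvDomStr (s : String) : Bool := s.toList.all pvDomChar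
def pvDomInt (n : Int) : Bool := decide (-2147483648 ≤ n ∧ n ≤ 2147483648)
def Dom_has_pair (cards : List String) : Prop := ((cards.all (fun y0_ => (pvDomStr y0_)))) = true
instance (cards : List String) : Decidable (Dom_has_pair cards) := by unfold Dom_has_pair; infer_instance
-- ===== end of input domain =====

-- B replaces A's hash-counting with a sort-then-scan over runs of equal values (alternative algorithm, same result).


-- ===== PORT A =====
def has_pair (cards : List String) : Bool :=
  -- card.split(" of ")[0]: split with a nonempty separator always returns a nonempty list,
  -- so the [0] index never raises; ported as headD on the split result.
  let card_counts : PySem.Dict String Int := cards.foldl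
    (fun d card =>
      let value := ((PySem.Str.split? card " of ").getD []).headD ""
      if d.contains value then d.modify value 0 (fun n => n + 1) else d.insert value 1)
    PySem.Dict.empty
  -- 'for card in card_counts: if card_counts[card] == 2: return True' / 'return False'
  card_counts.keys.any (fun card => card_counts.getD card 0 == 2)

-- ===== PORT B =====
-- B's scan loop over the sorted tail: cur = current run value, run = its length so far;
-- 'return True' inside the loop becomes the 'true' branch, the final 'return run == 2' is the base case.
def pvRunScan : List String → String → Nat → Bool
  | [], _, run => run == 2
  | v :: rest, cur, run =>
    if v == cur then pvRunScan rest cur (run + 1)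
    else if run == 2 then true else pvRunScan rest v 1

def has_pair_alt (cards : List String) : Bool :=
  let values := PySem.List.sorted
    (cards.map (fun card => ((PySem.Str.split? card " of ").getD []).headD ""))
    (fun x => x) false
  match values with
  | [] => false
  | v :: rest => pvRunScan rest v 1

-- ===== PRECONDITION & SPEC =====
def Spec_has_pair (cards : List String) (out : Bool) : Prop := out = has_pair_alt cards
instance (cards : List String) (out : Bool) : Decidable (Spec_has_pair cards out) := by unfold Spec_has_pair; infer_instance

-- ===== CLAIM (what is proved, stated in full; the proofs are below) =====
def Claim_equal_has_pair : Prop := ∀ (cards : List String), Dom_has_pair cards → Spec_has_pair cards (has_pair cards)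

-- ===== LEMMAS AND PROOFS =====

-- updating an absent key with modify(k, 0, +1) is exactly insert k 1
lemma insert_one_eq_modify (d : PySem.Dict String Int) (v : String)
    (h : d.contains v = false) : d.insert v 1 = d.modify v 0 (fun n => n + 1) := by
  simp [PySem.Dict.insert, PySem.Dict.modify, h, PySem.Dict.getD_of_not_contains d 0 h]

-- A's counting loop builds exactly Counter(values)
lemma fold_eq_counter (cards : List String) :
    cards.foldl
      (fun d card =>
        let value := ((PySem.Str.split? card " of ").getD []).headD ""
        if d.contains value then d.modify value 0 (fun n => n + 1) else d.insert value 1)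
      PySem.Dict.empty
    = PySem.Dict.counter (cards.map (fun card => ((PySem.Str.split? card " of ").getD []).headD "")) := by
  rw [PySem.Dict.counter_eq_foldl, List.foldl_map]
  apply PySem.List.foldl_congr_mem
  intro d card _
  by_cases hc : d.contains (((PySem.Str.split? card " of ").getD []).headD "") = true
  · simp only [hc, if_true]
  · simp only [Bool.not_eq_true] at hc
    simp only [hc, Bool.false_eq_true, if_false]
    exact insert_one_eq_modify d _ hc

lemma any_ofList (l : List String) :
    (PySem.Set.ofList l).any (fun v => ((l.count v : Int)) == 2)
      = l.any (fun v => l.count v == 2) := by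
  rw [Bool.eq_iff_iff]
  simp only [List.any_eq_true, PySem.Set.mem_ofList, beq_iff_eq]
  constructor <;> rintro ⟨x, hx, h2⟩ <;> exact ⟨x, hx, by omega⟩

-- A returns: some extracted value occurs exactly twice
lemma has_pair_char (cards : List String) :
    has_pair cards = true ↔
      ∃ v ∈ cards.map (fun card => ((PySem.Str.split? card " of ").getD []).headD ""),
        (cards.map (fun card => ((PySem.Str.split? card " of ").getD []).headD "")).count v = 2 := by
  unfold has_pair
  rw [fold_eq_counter]
  simp only [PySem.Dict.keys_counter, PySem.Dict.getD_counter]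
  rw [any_ofList]
  simp [List.any_eq_true]

-- the scan on a sorted (non-decreasing) tail finds exactly the pairs
lemma pvRunScan_iff (l : List String) (cur : String) (run : Nat)
    (hs : (cur :: l).Pairwise (· ≤ ·)) :
    pvRunScan l cur run = true ↔
      (run + l.count cur = 2 ∨ ∃ w ∈ l, w ≠ cur ∧ l.count w = 2) := by
  induction l generalizing cur run with
  | nil => simp [pvRunScan]
  | cons v rest ih =>
    rw [List.pairwise_cons] at hs
    obtain ⟨hle, hrest⟩ := hs
    by_cases hv : v = cur
    · subst hv
      simp only [pvRunScan, beq_self_eq_true, if_true]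
      rw [ih v (run + 1) hrest]
      constructor
      · rintro (h | ⟨w, hw, hne, hc⟩)
        · left; simp [List.count_cons] at *; omega
        · right; exact ⟨w, List.mem_cons_of_mem _ hw, hne, by simp [List.count_cons, Ne.symm hne, hc]⟩
      · rintro (h | ⟨w, hw, hne, hc⟩)
        · left; simp [List.count_cons] at h ⊢; omega
        · rcases List.mem_cons.mp hw with rfl | hw'
          · exact absurd rfl hne
          · right; refine ⟨w, hw', hne, ?_⟩
            simpa [List.count_cons, Ne.symm hne] using hc
    · have hlt : cur < v := lt_of_le_of_ne (hle v (List.mem_cons_self)) (Ne.symm hv)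
      have hvrest : ∀ z ∈ rest, v ≤ z := (List.pairwise_cons.mp hrest).1
      have hcurnot : cur ∉ v :: rest := by
        intro hmem
        rcases List.mem_cons.mp hmem with rfl | hmem'
        · exact absurd rfl (Ne.symm hv)
        · exact absurd (hvrest cur hmem') (not_le.mpr hlt)
      have hcount0 : (v :: rest).count cur = 0 := List.count_eq_zero.mpr hcurnot
      have hbeq : (v == cur) = false := by simp [hv]
      simp only [pvRunScan, hbeq, Bool.false_eq_true, if_false]
      by_cases hr : run = 2
      · simp only [hr]
        constructor
        · intro _; left; omega
        · intro _; rfl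
      · have hrb : (run == 2) = false := by simp [hr]
        simp only [hrb, Bool.false_eq_true, if_false]
        rw [ih v 1 hrest]
        constructor
        · rintro (h | ⟨w, hw, hne, hc⟩)
          · right
            refine ⟨v, List.mem_cons_self, hv, ?_⟩
            simp [List.count_cons]; omega
          · have hwne : w ≠ cur := by
              intro h; subst h
              exact absurd (hvrest w hw) (not_le.mpr hlt)
            right
            exact ⟨w, List.mem_cons_of_mem _ hw, hwne, by simp [List.count_cons, Ne.symm hne, hc]⟩
        · rintro (h | ⟨w, hw, hne, hc⟩)
          · omega
          · rcases List.mem_cons.mp hw with rfl | hw'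
            · left; simp [List.count_cons] at hc; omega
            · by_cases hwv : w = v
              · subst hwv
                left; simp [List.count_cons] at hc; omega
              · right
                refine ⟨w, hw', hwv, ?_⟩
                simpa [List.count_cons, Ne.symm hwv] using hc

-- B returns: some extracted value occurs exactly twice
lemma has_pair_alt_char (cards : List String) :
    has_pair_alt cards = true ↔
      ∃ v ∈ cards.map (fun card => ((PySem.Str.split? card " of ").getD []).headD ""),
        (cards.map (fun card => ((PySem.Str.split? card " of ").getD []).headD "")).count v = 2 := by
  unfold has_pair_alt
  set values := cards.map (fun card => ((PySem.Str.split? card " of ").getD []).headD "") with hval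
  have hperm : (PySem.List.sorted values (fun x => x) false).Perm values :=
    PySem.List.sorted_perm values (fun x => x) false
  have hpw : (PySem.List.sorted values (fun x => x) false).Pairwise (· ≤ ·) := by
    simpa using PySem.List.sorted_pairwise values (fun x => x)
  rcases hS : PySem.List.sorted values (fun x => x) false with _ | ⟨v, rest⟩
  · rw [hS] at hperm
    have : values = [] := hperm.symm.eq_nil
    simp [this]
  · rw [hS] at hperm hpw
    simp only
    rw [pvRunScan_iff rest v 1 hpw]
    have hcnt : ∀ w, values.count w = (v :: rest).count w := fun w => (hperm.count_eq w).symm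
    have hmem : ∀ w, w ∈ values ↔ w ∈ v :: rest := fun w => ⟨fun h => hperm.mem_iff.mpr h, fun h => hperm.mem_iff.mp h⟩
    constructor
    · rintro (h | ⟨w, hw, hne, hc⟩)
      · exact ⟨v, (hmem v).mpr List.mem_cons_self, by rw [hcnt]; simp [List.count_cons]; omega⟩
      · exact ⟨w, (hmem w).mpr (List.mem_cons_of_mem _ hw), by rw [hcnt]; simp [List.count_cons, Ne.symm hne, hc]⟩
    · rintro ⟨w, hw, hc⟩
      rw [hcnt] at hc
      rcases List.mem_cons.mp ((hmem w).mp hw) with rfl | hw'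
      · left; simp [List.count_cons] at hc; omega
      · by_cases hwv : w = v
        · subst hwv; left; simp [List.count_cons] at hc; omega
        · right
          refine ⟨w, hw', hwv, ?_⟩
          simpa [List.count_cons, Ne.symm hwv] using hc

-- ===== VERDICT (by name: the statement is the Claim_ definition above) =====
theorem has_pair_spec : Claim_equal_has_pair := by
  intro cards _
  unfold Spec_has_pair
  rw [Bool.eq_iff_iff, has_pair_char, has_pair_alt_char]
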